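-- pv_equiv track=rewrite | github.com/yuanzheliu/QASystem | ans/wh_answer.py | ans_each_type
-- ===== SOURCE A (Python) =====
-- def ans_each_type(type,st_ner):
--     ans = 'Sorry, I don\'t know'
--     for j, (st, ner_list) in enumerate(st_ner.items()):
--         for (ner, item) in ner_list.items():
--             if type =='PERSON' and ner =='PERSON':
--                 ans = item[0]
--             elif type == 'ORGANIZATION' and (ner =='ORGANIZATION' or ner =='GPE'):
--                 ans = item[0]
--     return ans
-- ===== SOURCE B (Python) =====
-- def ans_each_type(type, st_ner):
--     for st, ner_list in reversed(st_ner.items()):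
--         for ner, item in reversed(ner_list.items()):
--             if (type == 'PERSON' and ner == 'PERSON') or \
--                (type == 'ORGANIZATION' and ner in ('ORGANIZATION', 'GPE')):
--                 return item[0]
--     return 'Sorry, I don\'t know'
-- ===== Notes on version B (the rewrite author's own statement) =====
-- stated objective: alternative
-- what changed: Replaces A's scan-everything-and-overwrite accumulator with a reverse scan over both dict levels that returns the first (i.e. last-in-order) matching item immediately; Pre_ excludes inputs where some matching entry has an empty item list, on which A raises IndexError.
import Mathlib
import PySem

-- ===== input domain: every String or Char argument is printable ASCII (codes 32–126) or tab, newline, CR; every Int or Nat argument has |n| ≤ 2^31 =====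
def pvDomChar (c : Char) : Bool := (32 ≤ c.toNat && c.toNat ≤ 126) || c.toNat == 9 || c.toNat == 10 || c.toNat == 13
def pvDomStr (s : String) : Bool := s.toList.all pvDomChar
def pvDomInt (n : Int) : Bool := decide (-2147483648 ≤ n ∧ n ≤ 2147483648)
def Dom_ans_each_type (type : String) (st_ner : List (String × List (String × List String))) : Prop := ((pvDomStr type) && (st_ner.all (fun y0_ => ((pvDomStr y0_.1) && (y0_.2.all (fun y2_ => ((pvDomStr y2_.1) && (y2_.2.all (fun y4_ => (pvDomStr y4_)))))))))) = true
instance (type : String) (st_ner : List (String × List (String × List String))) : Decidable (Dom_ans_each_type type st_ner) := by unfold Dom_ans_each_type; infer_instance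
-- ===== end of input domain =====

-- B is a reverse scan with early return instead of A's overwrite-all accumulator; return values proved equal on Pre_.
-- ===== PORT A =====
-- literal port of A: fold over st_ner in order, inner fold over each ner_list,
-- overwriting ans with item[0] on every match (item[0] = pyGet?; none, i.e. A's
-- IndexError on an empty matching item, is excluded by Pre_ below; .getD ans is
-- only reached outside Pre_).
def ans_each_type (type : String) (st_ner : List (String × List (String × List String))) : String :=
  st_ner.foldl (fun ans stp =>
    stp.2.foldl (fun ans ni =>
      if type == "PERSON" && ni.1 == "PERSON" then (PySem.List.pyGet? ni.2 0).getD ans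
      else if type == "ORGANIZATION" && (ni.1 == "ORGANIZATION" || ni.1 == "GPE") then (PySem.List.pyGet? ni.2 0).getD ans
      else ans) ans) "Sorry, I don't know"

-- ===== PORT B =====
-- scan one ner_list (already reversed by the caller); some v = early return of item[0]
def altInner (type : String) : List (String × List String) → Option String
  | [] => none
  | ni :: rest =>
    if (type == "PERSON" && ni.1 == "PERSON") || (type == "ORGANIZATION" && (ni.1 == "ORGANIZATION" || ni.1 == "GPE")) then
      PySem.List.pyGet? ni.2 0
    else altInner type rest

-- scan the outer entries (already reversed by the caller)
def altOuter (type : String) : List (String × List (String × List String)) → Option String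
  | [] => none
  | stp :: rest =>
    match altInner type stp.2.reverse with
    | some v => some v
    | none => altOuter type rest

def ans_each_type_alt (type : String) (st_ner : List (String × List (String × List String))) : String :=
  (altOuter type st_ner.reverse).getD "Sorry, I don't know"

-- ===== PRECONDITION & SPEC =====
-- Pre_ excludes exactly the inputs on which A raises IndexError: some entry whose
-- ner matches the question type has an empty item list (A evaluates item[0] there).
def Pre_ans_each_type (type : String) (st_ner : List (String × List (String × List String))) : Prop :=
  ∀ stp ∈ st_ner, ∀ ni ∈ stp.2,
    ((type == "PERSON" && ni.1 == "PERSON") || (type == "ORGANIZATION" && (ni.1 == "ORGANIZATION" || ni.1 == "GPE"))) = true →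
    ni.2 ≠ []
instance (type : String) (st_ner : List (String × List (String × List String))) : Decidable (Pre_ans_each_type type st_ner) := by unfold Pre_ans_each_type; infer_instance

def pvWitness_ans_each_type : String × (List (String × List (String × List String))) :=
  ("PERSON", [("He ran.", [("PERSON", ["John"]), ("GPE", ["US"])]), ("She ran.", [("PERSON", ["Mary"])])])

def Spec_ans_each_type (type : String) (st_ner : List (String × List (String × List String))) (out : String) : Prop := out = ans_each_type_alt type st_ner
instance (type : String) (st_ner : List (String × List (String × List String))) (out : String) : Decidable (Spec_ans_each_type type st_ner out) := by unfold Spec_ans_each_type; infer_instance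

-- ===== CLAIM (what is proved, stated in full; the proofs are below) =====
def Claim_equal_ans_each_type : Prop := ∀ (type : String) (st_ner : List (String × List (String × List String))), Dom_ans_each_type type st_ner → Pre_ans_each_type type st_ner → Spec_ans_each_type type st_ner (ans_each_type type st_ner)

-- ===== LEMMAS AND PROOFS =====

-- the matching condition, and A's inner update step
def pvMatch (type ner : String) : Bool :=
  (type == "PERSON" && ner == "PERSON") || (type == "ORGANIZATION" && (ner == "ORGANIZATION" || ner == "GPE"))

def pvStep (type : String) (ans : String) (ni : String × List String) : String :=
  if type == "PERSON" && ni.1 == "PERSON" then (PySem.List.pyGet? ni.2 0).getD ans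
  else if type == "ORGANIZATION" && (ni.1 == "ORGANIZATION" || ni.1 == "GPE") then (PySem.List.pyGet? ni.2 0).getD ans
  else ans

lemma pvStep_eq (type ans : String) (ni : String × List String) :
    pvStep type ans ni = if pvMatch type ni.1 then (PySem.List.pyGet? ni.2 0).getD ans else ans := by
  simp only [pvStep, pvMatch]
  by_cases h1 : (type == "PERSON" && ni.1 == "PERSON") = true <;>
    by_cases h2 : (type == "ORGANIZATION" && (ni.1 == "ORGANIZATION" || ni.1 == "GPE")) = true <;>
    simp [h1, h2]

-- inner loop: the fold over l.reverse equals the early-return scan of l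
lemma inner_eq (type : String) (l : List (String × List String))
    (h : ∀ ni ∈ l, pvMatch type ni.1 = true → ni.2 ≠ []) (ans : String) :
    l.reverse.foldl (pvStep type) ans = (altInner type l).getD ans := by
  induction l generalizing ans with
  | nil => simp [altInner]
  | cons ni rest ih =>
    have hr : ∀ x ∈ rest, pvMatch type x.1 = true → x.2 ≠ [] := fun x hx => h x (List.mem_cons_of_mem _ hx)
    simp only [List.reverse_cons, List.foldl_append, List.foldl_cons, List.foldl_nil]
    rw [ih hr, pvStep_eq]
    simp only [altInner, pvMatch]
    by_cases hm : ((type == "PERSON" && ni.1 == "PERSON") || (type == "ORGANIZATION" && (ni.1 == "ORGANIZATION" || ni.1 == "GPE"))) = true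
    · have hne : ni.2 ≠ [] := h ni (List.mem_cons_self) (by simpa [pvMatch] using hm)
      obtain ⟨x, xs, hx⟩ := List.exists_cons_of_ne_nil hne
      simp [hm, hx, PySem.List.pyGet?, PySem.List.pyIdx?]
    · simp [hm]

-- outer loop: the fold over L.reverse equals the early-return scan of L
lemma outer_eq (type : String) (L : List (String × List (String × List String)))
    (h : ∀ stp ∈ L, ∀ ni ∈ stp.2, pvMatch type ni.1 = true → ni.2 ≠ []) (ans : String) :
    L.reverse.foldl (fun a stp => stp.2.foldl (pvStep type) a) ans = (altOuter type L).getD ans := by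
  induction L generalizing ans with
  | nil => simp [altOuter]
  | cons stp rest ih =>
    have hr : ∀ x ∈ rest, ∀ ni ∈ x.2, pvMatch type ni.1 = true → ni.2 ≠ [] :=
      fun x hx => h x (List.mem_cons_of_mem _ hx)
    have hs : ∀ ni ∈ stp.2, pvMatch type ni.1 = true → ni.2 ≠ [] := h stp (List.mem_cons_self)
    have hs' : ∀ ni ∈ stp.2.reverse, pvMatch type ni.1 = true → ni.2 ≠ [] := by
      intro ni hni; exact hs ni (List.mem_reverse.mp hni)
    simp only [List.reverse_cons, List.foldl_append, List.foldl_cons, List.foldl_nil]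
    rw [ih hr]
    have hinner := inner_eq type stp.2.reverse hs' ((altOuter type rest).getD ans)
    rw [List.reverse_reverse] at hinner
    rw [hinner]
    simp only [altOuter]
    cases hv : altInner type stp.2.reverse with
    | none => simp
    | some v => simp

-- ===== VERDICT (by name: the statement is the Claim_ definition above) =====
theorem ans_each_type_spec : Claim_equal_ans_each_type := by
  intro type st_ner _ hpre
  unfold Spec_ans_each_type ans_each_type ans_each_type_alt
  have h : ∀ stp ∈ st_ner, ∀ ni ∈ stp.2, pvMatch type ni.1 = true → ni.2 ≠ [] := by
    intro stp hstp ni hni hm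
    exact hpre stp hstp ni hni (by simpa [pvMatch] using hm)
  have := outer_eq type st_ner.reverse (by intro x hx; exact h x (List.mem_reverse.mp hx)) "Sorry, I don't know"
  rw [List.reverse_reverse] at this
  calc st_ner.foldl (fun ans stp => stp.2.foldl (fun a ni => pvStep type a ni) ans) "Sorry, I don't know"
      = (altOuter type st_ner.reverse).getD "Sorry, I don't know" := this
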